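-- pv_equiv track=rewrite | github.com/LaceySam/euler | 9/main.py | generate_triplet
-- ===== SOURCE A (Python) =====
-- def generate_triplet(maximum: int) -> (int, int, int):
--     for i in range(1, maximum):
--         for j in range(1, maximum):
--             if j < i:
--                 continue
--
--             for k in range(1, maximum):
--                 if k < j:
--                     continue
--
--                 if sum((i, j, k)) == maximum:
--                     yield i, j, k
-- ===== SOURCE B (Python) =====
-- def generate_triplet(maximum):
--     # Closed-form bounds: a valid triple needs 3*i <= maximum and 2*j <= maximum - i,
--     # so enumerate i in 1..maximum//3 and j in i..(maximum-i)//2; k is then forced.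
--     for i in range(1, maximum // 3 + 1):
--         for j in range(i, (maximum - i) // 2 + 1):
--             yield i, j, maximum - i - j
-- ===== Notes on version B (the rewrite author's own statement) =====
-- stated objective: faster
-- what changed: Replaced A's triple nested scan with filters by two loops over closed-form ranges (i up to maximum//3, j up to (maximum-i)//2) that yield unconditionally with the forced third value k = maximum - i - j.
import Mathlib
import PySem

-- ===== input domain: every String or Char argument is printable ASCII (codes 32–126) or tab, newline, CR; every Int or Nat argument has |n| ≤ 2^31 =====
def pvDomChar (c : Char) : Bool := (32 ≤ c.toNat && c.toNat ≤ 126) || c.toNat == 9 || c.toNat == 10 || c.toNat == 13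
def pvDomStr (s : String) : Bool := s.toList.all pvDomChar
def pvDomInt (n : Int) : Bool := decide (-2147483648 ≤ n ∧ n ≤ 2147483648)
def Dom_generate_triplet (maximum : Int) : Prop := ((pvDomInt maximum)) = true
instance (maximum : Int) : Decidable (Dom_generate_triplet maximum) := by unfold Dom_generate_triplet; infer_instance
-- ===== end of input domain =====

-- B enumerates i and j over closed-form ranges (i ≤ maximum//3, j ≤ (maximum-i)//2) and
-- yields unconditionally with the forced k = maximum - i - j: O(n^2) vs A's O(n^3).

-- ===== PORT A =====
-- Literal port of A: three nested range(1, maximum) loops with `continue` skips,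
-- collecting each yielded triple in order.
def generate_triplet (maximum : Int) : List (List Int) :=
  (PySem.List.pyRange 1 maximum 1).foldl (fun acc i =>
    (PySem.List.pyRange 1 maximum 1).foldl (fun acc j =>
      if j < i then acc
      else
        (PySem.List.pyRange 1 maximum 1).foldl (fun acc k =>
          if k < j then acc
          else if i + j + k = maximum then acc ++ [[i, j, k]] else acc) acc) acc) []

-- ===== PORT B =====
-- Literal port of B: nested generators over closed-form ranges, every iteration yields,
-- so the outer loop is a flatMap and the inner one a map.
def generate_triplet_alt (maximum : Int) : List (List Int) :=
  (PySem.List.pyRange 1 (PySem.Int.floordiv maximum 3 + 1) 1).flatMap (fun i =>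
    (PySem.List.pyRange i (PySem.Int.floordiv (maximum - i) 2 + 1) 1).map (fun j =>
      [i, j, maximum - i - j]))

-- ===== PRECONDITION & SPEC =====
def Spec_generate_triplet (maximum : Int) (out : List (List Int)) : Prop := out = generate_triplet_alt maximum
instance (maximum : Int) (out : List (List Int)) : Decidable (Spec_generate_triplet maximum out) := by unfold Spec_generate_triplet; infer_instance

-- ===== CLAIM (what is proved, stated in full; the proofs are below) =====
def Claim_equal_generate_triplet : Prop := ∀ (maximum : Int), Dom_generate_triplet maximum → Spec_generate_triplet maximum (generate_triplet maximum)

-- ===== LEMMAS AND PROOFS =====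

-- A's innermost k-loop collapses to a single forced-k check.
theorem gt_inner_k (m i j : Int) (hi : 1 ≤ i) (hij : i ≤ j) (hjm : j < m) (acc : List (List Int)) :
    (PySem.List.pyRange 1 m 1).foldl (fun acc k =>
      if k < j then acc
      else if i + j + k = m then acc ++ [[i, j, k]] else acc) acc
    = if m - i - j ≥ j then acc ++ [[i, j, m - i - j]] else acc := by
  rw [PySem.List.foldl_congr_mem _ _
      (fun acc k => if j ≤ k ∧ i + j + k = m then acc ++ [[i, j, k]] else acc) acc
      (by
        intro acc k _
        by_cases h1 : k < j <;> by_cases h2 : i + j + k = m <;>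
          simp [h1, h2])]
  rw [PySem.List.foldl_append_ite]
  by_cases hc : m - i - j ≥ j
  · rw [if_pos hc]
    have hfil : (PySem.List.pyRange 1 m 1).filter (fun k => decide (j ≤ k ∧ i + j + k = m))
        = [m - i - j] := by
      rw [List.filter_congr (q := fun k => k == m - i - j)
        (by
          intro x _
          by_cases hx : x = m - i - j
          · subst hx
            simp only [beq_self_eq_true, decide_eq_true_eq]
            omega
          · simp only [beq_eq_false_iff_ne.mpr hx, decide_eq_false_iff_not, not_and]
            omega)]
      rw [List.filter_beq,
        List.count_eq_one_of_mem (PySem.List.nodup_pyRange_one 1 m)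
          (by rw [PySem.List.mem_pyRange_one]; omega)]
      rfl
    rw [hfil]; rfl
  · rw [if_neg hc]
    have hfil : (PySem.List.pyRange 1 m 1).filter (fun k => decide (j ≤ k ∧ i + j + k = m))
        = [] := by
      rw [List.filter_eq_nil_iff]
      intro k hk
      rw [PySem.List.mem_pyRange_one] at hk
      simp only [decide_eq_true_eq, not_and]
      omega
    rw [hfil]; simp

-- Filtering an interval condition out of a range yields the sub-range.
theorem gt_filter_pyRange (a b c d : Int) (hac : a ≤ c) (hdb : c < d → d ≤ b) :
    (PySem.List.pyRange a b 1).filter (fun x => decide (c ≤ x ∧ x < d))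
      = PySem.List.pyRange c d 1 := by
  by_cases hcd : c < d
  · have hdb' := hdb hcd
    rw [PySem.List.pyRange_one_append a c b hac (by omega), List.filter_append,
        PySem.List.pyRange_one_append c d b (by omega) hdb', List.filter_append]
    have h1 : (PySem.List.pyRange a c 1).filter (fun x => decide (c ≤ x ∧ x < d)) = [] := by
      rw [List.filter_eq_nil_iff]
      intro x hx
      rw [PySem.List.mem_pyRange_one] at hx
      simp only [decide_eq_true_eq, not_and]
      omega
    have h2 : (PySem.List.pyRange c d 1).filter (fun x => decide (c ≤ x ∧ x < d))
        = PySem.List.pyRange c d 1 := by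
      rw [List.filter_eq_self]
      intro x hx
      rw [PySem.List.mem_pyRange_one] at hx
      simp only [decide_eq_true_eq]
      omega
    have h3 : (PySem.List.pyRange d b 1).filter (fun x => decide (c ≤ x ∧ x < d)) = [] := by
      rw [List.filter_eq_nil_iff]
      intro x hx
      rw [PySem.List.mem_pyRange_one] at hx
      simp only [decide_eq_true_eq, not_and]
      omega
    rw [h1, h2, h3]; simp
  · rw [PySem.List.pyRange_one_eq_nil (a := c) (b := d) (by omega), List.filter_eq_nil_iff]
    intro x hx
    simp only [decide_eq_true_eq, not_and]
    omega

-- A's j-loop over range(1, m) equals B's closed-form inner comprehension, appended.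
theorem gt_j_loop (m i : Int) (hi : 1 ≤ i) (him : i < m) (acc : List (List Int)) :
    (PySem.List.pyRange 1 m 1).foldl (fun acc j =>
      if j < i then acc
      else
        (PySem.List.pyRange 1 m 1).foldl (fun acc k =>
          if k < j then acc
          else if i + j + k = m then acc ++ [[i, j, k]] else acc) acc) acc
    = acc ++ (PySem.List.pyRange i (PySem.Int.floordiv (m - i) 2 + 1) 1).map
        (fun j => [i, j, m - i - j]) := by
  rw [PySem.List.foldl_congr_mem _ _
      (fun acc j => if i ≤ j ∧ j < PySem.Int.floordiv (m - i) 2 + 1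
          then acc ++ [[i, j, m - i - j]] else acc) acc
      (by
        intro acc j hj
        rw [PySem.List.mem_pyRange_one] at hj
        beta_reduce
        by_cases h1 : j < i
        · rw [if_pos h1, if_neg (by omega)]
        · rw [if_neg h1, gt_inner_k m i j hi (by omega) hj.2 acc]
          have hiff : m - i - j ≥ j ↔ j < PySem.Int.floordiv (m - i) 2 + 1 := by
            have := (PySem.Int.le_floordiv_iff_mul_le (a := m - i) (b := 2) (q := j) (by omega))
            omega
          by_cases h2 : m - i - j ≥ j
          · rw [if_pos h2, if_pos ⟨by omega, hiff.mp h2⟩]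
          · rw [if_neg h2, if_neg (by simp only [not_and]; intro _; omega)]
      )]
  rw [PySem.List.foldl_append_ite, gt_filter_pyRange 1 m i (PySem.Int.floordiv (m - i) 2 + 1) hi
    (by
      intro hlt
      have h1 : PySem.Int.floordiv (m - i) 2 < m := by
        have := (PySem.Int.floordiv_lt_iff_lt_mul (a := m - i) (b := 2) (q := m) (by omega))
        omega
      omega)]

-- ===== VERDICT (by name: the statement is the Claim_ definition above) =====
theorem generate_triplet_spec : Claim_equal_generate_triplet := by
  intro m _
  unfold Spec_generate_triplet generate_triplet generate_triplet_alt
  by_cases hm : m ≤ 1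
  · rw [PySem.List.pyRange_one_eq_nil (by omega),
        PySem.List.pyRange_one_eq_nil (a := 1) (b := PySem.Int.floordiv m 3 + 1)
          (by
            have := (PySem.Int.le_floordiv_iff_mul_le (a := m) (b := 3) (q := 1) (by omega))
            omega)]
    rfl
  · rw [PySem.List.foldl_congr_mem _ _
        (fun acc i => acc ++ (PySem.List.pyRange i (PySem.Int.floordiv (m - i) 2 + 1) 1).map
          (fun j => [i, j, m - i - j])) []
        (by
          intro acc i hi
          rw [PySem.List.mem_pyRange_one] at hi
          exact gt_j_loop m i hi.1 hi.2 acc)]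
    rw [PySem.List.foldl_append_eq_flatMap, List.nil_append]
    have ht1 : (1 : Int) ≤ PySem.Int.floordiv m 3 + 1 := by
      have := (PySem.Int.le_floordiv_iff_mul_le (a := m) (b := 3) (q := 0) (by omega))
      omega
    have ht2 : PySem.Int.floordiv m 3 + 1 ≤ m := by
      have := (PySem.Int.floordiv_lt_iff_lt_mul (a := m) (b := 3) (q := m) (by omega))
      omega
    rw [PySem.List.pyRange_one_append 1 (PySem.Int.floordiv m 3 + 1) m ht1 ht2,
        List.flatMap_append]
    have htail : (PySem.List.pyRange (PySem.Int.floordiv m 3 + 1) m 1).flatMap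
        (fun i => (PySem.List.pyRange i (PySem.Int.floordiv (m - i) 2 + 1) 1).map
          (fun j => [i, j, m - i - j])) = [] := by
      rw [List.flatMap_eq_nil_iff]
      intro i hi
      rw [PySem.List.mem_pyRange_one] at hi
      have h3 : m < i * 3 := by
        have := (PySem.Int.floordiv_lt_iff_lt_mul (a := m) (b := 3) (q := i) (by omega))
        omega
      rw [PySem.List.pyRange_one_eq_nil
          (by
            have := (PySem.Int.floordiv_lt_iff_lt_mul (a := m - i) (b := 2) (q := i) (by omega))
            omega)]
      rfl
    rw [htail, List.append_nil]
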